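-- pv_equiv track=rewrite | github.com/falcucci/dicomcrop | dicomcrop/lib.py | find_nearest_key_by_value
-- ===== SOURCE A (Python) =====
-- def find_nearest_key_by_value(mydict, high_key, minimal) -> int:
--     """
--     This function takes in a dictionary, a high key, and a minimal value,
--     and returns the key in the dictionary closest to the minimal value.
--     It creates a list of keys, up to the high key, and uses a lambda function
--     to return the key closest to the minimal value.
--     """
--     l_r_pixel_keys: list[int] = []
--     for key in mydict.keys():
--         l_r_pixel_keys.append(key)
--         if key == high_key:
--             break
--
--     l_r_pixel_keys: list[int] = l_r_pixel_keys[::-1]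
--     for r_key in l_r_pixel_keys:
--         if mydict[r_key] <= minimal:
--             return r_key
--     return high_key
-- ===== SOURCE B (Python) =====
-- def find_nearest_key_by_value(mydict, high_key, minimal) -> int:
--     result = high_key
--     for key, value in mydict.items():
--         if value <= minimal:
--             result = key
--         if key == high_key:
--             break
--     return result
-- ===== Notes on version B (the rewrite author's own statement) =====
-- stated objective: simpler
-- what changed: Replaces the three-step build-prefix-list / reverse / scan-for-first-match with a single forward pass over the items that keeps the last key whose value is <= minimal and stops after high_key, with no intermediate lists.
import Mathlib
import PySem

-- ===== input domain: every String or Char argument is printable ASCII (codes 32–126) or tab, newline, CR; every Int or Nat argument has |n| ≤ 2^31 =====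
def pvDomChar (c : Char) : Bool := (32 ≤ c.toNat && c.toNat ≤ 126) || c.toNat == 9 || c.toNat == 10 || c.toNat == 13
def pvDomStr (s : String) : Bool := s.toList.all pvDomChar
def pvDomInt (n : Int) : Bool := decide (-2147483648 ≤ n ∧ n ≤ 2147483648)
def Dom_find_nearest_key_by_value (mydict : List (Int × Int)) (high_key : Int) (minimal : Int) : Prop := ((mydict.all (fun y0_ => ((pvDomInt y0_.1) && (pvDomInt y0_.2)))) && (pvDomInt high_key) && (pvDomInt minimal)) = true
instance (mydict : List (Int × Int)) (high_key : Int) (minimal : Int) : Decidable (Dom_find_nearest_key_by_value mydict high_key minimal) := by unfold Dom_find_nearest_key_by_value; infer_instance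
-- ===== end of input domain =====

-- B replaces A's build-keys-list / reverse / first-match scan by one forward pass keeping the last matching key; objective: simpler (same O(n) cost).


-- ===== PORT A =====
-- first loop of A: collect keys in order, stopping after (and including) high_key
def pvKeysUpto (ks : List Int) (high_key : Int) : List Int :=
  match ks with
  | [] => []
  | k :: t => k :: (if k = high_key then [] else pvKeysUpto t high_key)

-- second loop of A: return the first key of the (reversed) list whose value is ≤ minimal, else the default (high_key)
def pvScanA (d : PySem.Dict Int Int) (minimal : Int) (dflt : Int) : List Int → Int
  | [] => dflt
  | r :: t => if d.getD r 0 ≤ minimal then r else pvScanA d minimal dflt t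

def find_nearest_key_by_value (mydict : List (Int × Int)) (high_key : Int) (minimal : Int) : Int :=
  let d : PySem.Dict Int Int := PySem.Dict.mk mydict
  pvScanA d minimal high_key ((pvKeysUpto d.keys high_key).reverse)

-- ===== PORT B =====
def pvLoopB (high_key minimal : Int) : List (Int × Int) → Int → Int
  | [], res => res
  | (k, v) :: t, res =>
      let res' := if v ≤ minimal then k else res
      if k = high_key then res' else pvLoopB high_key minimal t res'

def find_nearest_key_by_value_alt (mydict : List (Int × Int)) (high_key : Int) (minimal : Int) : Int :=
  pvLoopB high_key minimal mydict high_key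

-- ===== PRECONDITION & SPEC =====
-- Pre_ excludes association lists with duplicate keys: a Python dict cannot represent them, so the
-- Lean list with a duplicate key corresponds to no actual input of A (the dict collapses duplicates).
def Pre_find_nearest_key_by_value (mydict : List (Int × Int)) (high_key : Int) (minimal : Int) : Prop :=
  (mydict.map Prod.fst).Nodup
instance (mydict : List (Int × Int)) (high_key : Int) (minimal : Int) : Decidable (Pre_find_nearest_key_by_value mydict high_key minimal) := by unfold Pre_find_nearest_key_by_value; infer_instance
def pvWitness_find_nearest_key_by_value : (List (Int × Int)) × Int × Int := ([(1, 2), (3, 0)], 3, 0)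
def Spec_find_nearest_key_by_value (mydict : List (Int × Int)) (high_key : Int) (minimal : Int) (out : Int) : Prop := out = find_nearest_key_by_value_alt mydict high_key minimal
instance (mydict : List (Int × Int)) (high_key : Int) (minimal : Int) (out : Int) : Decidable (Spec_find_nearest_key_by_value mydict high_key minimal out) := by unfold Spec_find_nearest_key_by_value; infer_instance

-- ===== CLAIM (what is proved, stated in full; the proofs are below) =====
def Claim_equal_find_nearest_key_by_value : Prop := ∀ (mydict : List (Int × Int)) (high_key : Int) (minimal : Int), Dom_find_nearest_key_by_value mydict high_key minimal → Pre_find_nearest_key_by_value mydict high_key minimal → Spec_find_nearest_key_by_value mydict high_key minimal (find_nearest_key_by_value mydict high_key minimal)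

-- ===== LEMMAS AND PROOFS =====

-- scanning l ++ [k] checks k only after all of l: it folds k into the default
theorem pvScanA_append (d : PySem.Dict Int Int) (m dflt k : Int) (l : List Int) :
    pvScanA d m dflt (l ++ [k]) = pvScanA d m (if d.getD k 0 ≤ m then k else dflt) l := by
  induction l with
  | nil => simp [pvScanA]
  | cons x t ih => simp [pvScanA, ih]

-- the forward pass equals A's reverse-scan of the key prefix, for any starting accumulator,
-- provided each pair of the traversed suffix agrees with the dict lookup
theorem pvLoopB_eq_scan (d : PySem.Dict Int Int) (hk m : Int) :
    ∀ (t : List (Int × Int)), (∀ p ∈ t, d.getD p.1 0 = p.2) →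
      ∀ acc, pvLoopB hk m t acc = pvScanA d m acc ((pvKeysUpto (t.map Prod.fst) hk).reverse) := by
  intro t
  induction t with
  | nil => intro _ acc; simp [pvLoopB, pvKeysUpto, pvScanA]
  | cons p t ih =>
    intro hcons acc
    obtain ⟨k, v⟩ := p
    have hkv : d.getD k 0 = v := hcons (k, v) (by simp)
    have ht : ∀ p ∈ t, d.getD p.1 0 = p.2 := fun p hp => hcons p (by simp [hp])
    by_cases hke : k = hk
    · subst hke; simp [pvLoopB, pvKeysUpto, pvScanA, hkv]
    · simp only [pvLoopB, pvKeysUpto, List.map_cons, if_neg hke, List.reverse_cons,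
        pvScanA_append, hkv]
      exact ih ht _

theorem find_nearest_key_by_value_spec : Claim_equal_find_nearest_key_by_value := by
  intro mydict high_key minimal _ hpre
  unfold Spec_find_nearest_key_by_value find_nearest_key_by_value find_nearest_key_by_value_alt
  have hnd : (PySem.Dict.mk mydict).keys.Nodup := by
    simpa [PySem.Dict.keys] using hpre
  have hcons : ∀ p ∈ mydict, (PySem.Dict.mk mydict).getD p.1 0 = p.2 := by
    intro p hp
    exact PySem.Dict.getD_of_mem_items (PySem.Dict.mk mydict)
      (show (p.1, p.2) ∈ (PySem.Dict.mk mydict).items by simpa using hp) hnd 0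
  have hkeys : (PySem.Dict.mk mydict).keys = mydict.map Prod.fst := by
    simp [PySem.Dict.keys]
  rw [hkeys] at *
  exact (pvLoopB_eq_scan (PySem.Dict.mk mydict) high_key minimal mydict hcons high_key).symm
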